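-- pv_equiv track=rewrite | github.com/FrateanuTudor1E2/LabPython3E2 | Lab2/Ex9.py | get_spectators
-- ===== SOURCE A (Python) =====
-- def get_spectators(matrix):
--
--     sol = set()
--     for j in range(0, len(matrix[0])):
--         for i in range(0, len(matrix)):
--             for k in range(0, i):
--                 if matrix[i][j] <= matrix[k][j]:
--                     sol.add((i, j))
--
--     return sol
-- ===== SOURCE B (Python) =====
-- def get_spectators(matrix):
--     sol = set()
--     for j, col in enumerate(zip(*matrix)):
--         mx = col[0]
--         for i, v in enumerate(col[1:], 1):
--             if v <= mx:
--                 sol.add((i, j))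
--             else:
--                 mx = v
--     return sol
-- ===== Notes on version B (the rewrite author's own statement) =====
-- stated objective: faster
-- what changed: A scans all earlier rows of the column for every cell (triple nested index loop); B transposes the matrix with zip(*matrix) and walks each column once with enumerate, keeping a single running maximum, so the inner scan disappears.
import Mathlib
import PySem

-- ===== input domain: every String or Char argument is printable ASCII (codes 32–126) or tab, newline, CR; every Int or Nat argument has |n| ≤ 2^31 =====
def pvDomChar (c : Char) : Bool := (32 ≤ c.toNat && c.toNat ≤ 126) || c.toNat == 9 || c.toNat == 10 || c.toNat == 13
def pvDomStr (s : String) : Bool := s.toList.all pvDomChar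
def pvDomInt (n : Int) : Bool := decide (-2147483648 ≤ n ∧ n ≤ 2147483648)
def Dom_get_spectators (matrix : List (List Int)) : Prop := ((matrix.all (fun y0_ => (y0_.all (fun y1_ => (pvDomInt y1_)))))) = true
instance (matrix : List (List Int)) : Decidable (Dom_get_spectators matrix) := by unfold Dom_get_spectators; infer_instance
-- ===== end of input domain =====

-- B transposes the matrix (zip) and walks each column once with a running maximum, removing A's inner scan over earlier rows (asymptotically faster).

-- ===== PORT A =====
def get_spectators (matrix : List (List Int)) : List (Int × Int) :=
  let sol : PySem.Set (Int × Int) := PySem.Set.empty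
  (PySem.List.pyRange 0 ((PySem.List.pyGetD matrix 0 []).length : Int) 1).foldl (fun sol j =>
    (PySem.List.pyRange 0 (matrix.length : Int) 1).foldl (fun sol i =>
      (PySem.List.pyRange 0 i 1).foldl (fun sol k =>
        if PySem.List.pyGetD (PySem.List.pyGetD matrix i []) j 0 ≤
           PySem.List.pyGetD (PySem.List.pyGetD matrix k []) j 0
        then PySem.Set.add sol (i, j) else sol) sol) sol) sol

-- ===== PORT B =====
-- zip(*matrix): list of columns, truncated to the shortest row
def pyZipCols (rows : List (List Int)) : List (List Int) :=
  if h : rows ≠ [] ∧ rows.all (fun r => !r.isEmpty) then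
    (rows.map (fun r => r.headD 0)) :: pyZipCols (rows.map List.tail)
  else []
termination_by (rows.headD []).length
decreasing_by
  obtain ⟨hne, hall⟩ := h
  cases rows with
  | nil => exact absurd rfl hne
  | cons r t =>
      simp only [List.headD_cons]
      have : ¬ r.isEmpty := by simpa using List.all_eq_true.mp hall r (by simp)
      cases r with
      | nil => simp at this
      | cons a r' => simp

def get_spectators_alt (matrix : List (List Int)) : List (Int × Int) :=
  let sol : PySem.Set (Int × Int) := PySem.Set.empty
  (PySem.List.enumerate (pyZipCols matrix) 0).foldl (fun sol jc =>
    let mx := PySem.List.pyGetD jc.2 0 0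
    ((PySem.List.enumerate (PySem.List.slice jc.2 (some 1) none) 1).foldl (fun st iv =>
        if iv.2 ≤ st.2 then (PySem.Set.add st.1 (iv.1, jc.1), st.2) else (st.1, iv.2))
      (sol, mx)).1) sol

-- ===== PRECONDITION & SPEC =====
-- Pre_ excludes exactly the inputs where A raises IndexError: the empty matrix
-- (matrix[0]) and ragged matrices with some row shorter than row 0 (matrix[i][j]).
def Pre_get_spectators (matrix : List (List Int)) : Prop :=
  matrix ≠ [] ∧ ∀ row ∈ matrix, (matrix.headD []).length ≤ row.length
instance (matrix : List (List Int)) : Decidable (Pre_get_spectators matrix) := by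
  unfold Pre_get_spectators; infer_instance
def pvWitness_get_spectators : List (List Int) := [[3, 1], [2, 5], [2, 4]]
def Spec_get_spectators (matrix : List (List Int)) (out : List (Int × Int)) : Prop := out = get_spectators_alt matrix
instance (matrix : List (List Int)) (out : List (Int × Int)) : Decidable (Spec_get_spectators matrix out) := by unfold Spec_get_spectators; infer_instance

-- ===== CLAIM (what is proved, stated in full; the proofs are below) =====
def Claim_equal_get_spectators : Prop := ∀ (matrix : List (List Int)), Dom_get_spectators matrix → Pre_get_spectators matrix → Spec_get_spectators matrix (get_spectators matrix)

-- ===== LEMMAS AND PROOFS =====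

-- folding "add x whenever p k" over a list = one conditional add
theorem pv_foldl_addIf (p : Int → Prop) [DecidablePred p] (x : Int × Int)
    (l : List Int) (s : PySem.Set (Int × Int)) :
    l.foldl (fun s k => if p k then PySem.Set.add s x else s) s
      = if ∃ k ∈ l, p k then PySem.Set.add s x else s := by
  induction l generalizing s with
  | nil => simp
  | cons a l ih =>
    simp only [List.foldl_cons]
    by_cases hpa : p a
    · simp only [hpa, if_pos]
      rw [ih]
      have hmem : x ∈ PySem.Set.add s x := by
        rw [PySem.Set.mem_add]; exact Or.inr rfl
      rw [PySem.Set.add_of_mem hmem]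
      simp [hpa]
    · simp only [hpa, if_false]
      rw [ih]
      simp [hpa]

-- running max over the first n entries: value and bounds
theorem pv_runmax_spec (v : Int → Int) (n : Int) (hn : 1 ≤ n) :
    (∃ k, 0 ≤ k ∧ k < n ∧ v k =
        (PySem.List.pyRange 1 n 1).foldl (fun m i => max m (v i)) (v 0)) ∧
    (∀ k, 0 ≤ k → k < n →
        v k ≤ (PySem.List.pyRange 1 n 1).foldl (fun m i => max m (v i)) (v 0)) := by
  induction n, hn using Int.le_induction with
  | base =>
    rw [PySem.List.pyRange_one_eq_nil (by omega)]
    constructor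
    · exact ⟨0, by omega, by omega, rfl⟩
    · intro k h0 h1
      have : k = 0 := by omega
      simp [this]
  | succ n hn ih =>
    rw [PySem.List.pyRange_one_succ_right (by omega), List.foldl_append]
    simp only [List.foldl_cons, List.foldl_nil]
    obtain ⟨⟨k0, hk0, hk0n, hvk0⟩, hub⟩ := ih
    rcases le_total (v n) ((PySem.List.pyRange 1 n 1).foldl (fun m i => max m (v i)) (v 0)) with h | h
    · rw [max_eq_left h]
      exact ⟨⟨k0, hk0, by omega, hvk0⟩, fun k h0 h1 => by
        rcases lt_or_ge k n with hlt | hge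
        · exact hub k h0 hlt
        · have : k = n := by omega
          simp [this, h]⟩
    · rw [max_eq_right h]
      refine ⟨⟨n, by omega, by omega, rfl⟩, fun k h0 h1 => ?_⟩
      rcases lt_or_ge k n with hlt | hge
      · exact le_trans (hub k h0 hlt) h
      · have : k = n := by omega
        simp [this]

-- per-column equivalence, with the running max tracked as the pair's 2nd component
theorem pv_column (v : Int → Int) (j : Int) (n : Int) (hn : 1 ≤ n)
    (s : PySem.Set (Int × Int)) :
    (PySem.List.pyRange 1 n 1).foldl (fun st i =>
        if v i ≤ st.2 then (PySem.Set.add st.1 (i, j), st.2) else (st.1, v i)) (s, v 0)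
      = ((PySem.List.pyRange 0 n 1).foldl (fun s i =>
          (PySem.List.pyRange 0 i 1).foldl (fun s k =>
            if v i ≤ v k then PySem.Set.add s (i, j) else s) s) s,
         (PySem.List.pyRange 1 n 1).foldl (fun m i => max m (v i)) (v 0)) := by
  induction n, hn using Int.le_induction with
  | base =>
    rw [PySem.List.pyRange_one_eq_nil (le_refl 1),
        PySem.List.pyRange_one_cons (by omega : (0:Int) < 1),
        show (0:Int)+1 = 1 from rfl, PySem.List.pyRange_one_eq_nil (le_refl 1)]
    simp
  | succ n hn ih =>
    rw [PySem.List.pyRange_one_succ_right (show (1:Int) ≤ n by omega),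
        PySem.List.pyRange_one_succ_right (show (0:Int) ≤ n by omega),
        List.foldl_append, List.foldl_append, List.foldl_append]
    rw [ih]
    simp only [List.foldl_cons, List.foldl_nil]
    rw [pv_foldl_addIf (fun k => v n ≤ v k) (n, j)]
    obtain ⟨⟨k0, hk0, hk0n, hvk0⟩, hub⟩ := pv_runmax_spec v n hn
    by_cases h : v n ≤ (PySem.List.pyRange 1 n 1).foldl (fun m i => max m (v i)) (v 0)
    · have hex : ∃ k ∈ PySem.List.pyRange 0 n 1, v n ≤ v k := by
        exact ⟨k0, by rw [PySem.List.mem_pyRange_one]; omega, by rw [hvk0]; exact h⟩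
      simp only [h, if_pos, hex, max_eq_left h]
    · have hnex : ¬ ∃ k ∈ PySem.List.pyRange 0 n 1, v n ≤ v k := by
        rintro ⟨k, hk, hvk⟩
        rw [PySem.List.mem_pyRange_one] at hk
        exact h (le_trans hvk (hub k hk.1 hk.2))
      simp only [h, if_false, hnex, max_eq_right (le_of_not_ge h)]

-- enumerate commutes with map
theorem pv_enum_map {α β : Type} (f : α → β) (l : List α) (s : Int) :
    PySem.List.enumerate (l.map f) s
      = (PySem.List.enumerate l s).map (fun p => (p.1, f p.2)) := by
  induction l generalizing s with
  | nil => simp [PySem.List.enumerate_nil]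
  | cons a l ih => simp [PySem.List.enumerate_cons, ih]

-- enumerating a range starting at its own first bound pairs each element with itself
theorem pv_enum_range_aux (k : Nat) : ∀ a : Int,
    PySem.List.enumerate (PySem.List.pyRange a (a + k) 1) a
      = (PySem.List.pyRange a (a + k) 1).map (fun i => (i, i)) := by
  induction k with
  | zero => intro a; rw [PySem.List.pyRange_one_eq_nil (by omega)]; simp [PySem.List.enumerate_nil]
  | succ k ih =>
      intro a
      rw [PySem.List.pyRange_one_cons (by omega : a < a + (k + 1 : Nat))]
      rw [PySem.List.enumerate_cons, List.map_cons]
      have : a + ((k : Int) + 1) = (a + 1) + k := by ring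
      simp only [Nat.cast_add, Nat.cast_one, this]
      rw [ih (a + 1)]

theorem pv_enum_range (a b : Int) :
    PySem.List.enumerate (PySem.List.pyRange a b 1) a
      = (PySem.List.pyRange a b 1).map (fun i => (i, i)) := by
  by_cases h : b ≤ a
  · rw [PySem.List.pyRange_one_eq_nil h]; simp [PySem.List.enumerate_nil]
  · have hb : b = a + ((b - a).toNat : Int) := by omega
    rw [hb]; exact pv_enum_range_aux (b - a).toNat a

-- zip(*rows) = the columns indexed by the head row, when every row is at least as long
theorem pv_zip_eq (c : Nat) : ∀ (rows : List (List Int)), rows ≠ [] →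
    (rows.headD []).length = c → (∀ r ∈ rows, c ≤ r.length) →
    pyZipCols rows
      = (PySem.List.pyRange 0 (c : Int) 1).map (fun j => rows.map (fun r => PySem.List.pyGetD r j 0)) := by
  induction c with
  | zero =>
      intro rows hne hh _
      rw [pyZipCols]
      have : ¬ (rows ≠ [] ∧ rows.all (fun r => !r.isEmpty)) := by
        rintro ⟨-, hall⟩
        have hh' : (rows.headD []) ∈ rows := by
          cases rows with
          | nil => exact absurd rfl hne
          | cons r t => simp
        have := List.all_eq_true.mp hall _ hh'
        simp only [Bool.not_eq_eq_eq_not, Bool.not_true] at this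
        have hlen := hh
        cases h : rows.headD [] with
        | nil => rw [h] at this; simp at this
        | cons x xs => rw [h] at hlen; simp at hlen
      rw [dif_neg this, PySem.List.pyRange_one_eq_nil (by omega)]
      simp
  | succ c ih =>
      intro rows hne hh hall
      have hnonemp : ∀ r ∈ rows, r ≠ [] := by
        intro r hr h
        have := hall r hr
        simp [h] at this
      have hallb : rows.all (fun r => !r.isEmpty) = true := by
        rw [List.all_eq_true]
        intro r hr
        cases r with
        | nil => exact absurd rfl (hnonemp [] hr)
        | cons x xs => simp
      rw [pyZipCols, dif_pos ⟨hne, hallb⟩]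
      have hcast : ((c + 1 : Nat) : Int) = (c : Int) + 1 := by push_cast; ring
      rw [hcast, PySem.List.pyRange_one_cons (by omega : (0:Int) < (c:Int) + 1), List.map_cons]
      congr 1
      · apply List.map_congr_left
        intro r hr
        have := hnonemp r hr
        cases r with
        | nil => exact absurd rfl this
        | cons x xs => simp [PySem.List.pyGetD_zero_cons]
      · have htail := ih (rows.map List.tail)
          (by cases rows with
              | nil => exact absurd rfl hne
              | cons r t => simp)
          (by cases rows with
              | nil => exact absurd rfl hne
              | cons r t =>
                  simp only [List.map_cons, List.headD_cons, List.length_tail]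
                  simp only [List.headD_cons] at hh; omega)
          (by intro r' hr'
              obtain ⟨r, hr, rfl⟩ := List.mem_map.mp hr'
              have := hall r hr
              simp only [List.length_tail]; omega)
        rw [htail]
        rw [show (0:Int)+1 = (1:Int) from rfl,
            PySem.List.pyRange_one 1 ((c:Int)+1), PySem.List.pyRange_one 0 (c:Int)]
        simp only [show ((c:Int)+1-1).toNat = c by omega, show ((c:Int)-0).toNat = c by omega,
          List.map_map]
        apply List.map_congr_left
        intro k hk
        apply List.map_congr_left
        intro r hr
        have hr0 := hnonemp r hr
        cases r with
        | nil => exact absurd rfl hr0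
        | cons x xs =>
            simp only [Function.comp_apply, List.tail_cons]
            rw [show (1:Int) + (k:Int) = (((k+1:Nat)):Int) by omega,
                show (0:Int) + (k:Int) = ((k:Nat):Int) by omega]
            rw [PySem.List.pyGetD_natCast, PySem.List.pyGetD_natCast]
            simp

-- ===== VERDICT (by name: the statement is the Claim_ definition above) =====
theorem get_spectators_spec : Claim_equal_get_spectators := by
  intro matrix _ hpre
  unfold Spec_get_spectators get_spectators get_spectators_alt
  obtain ⟨hne, hrows⟩ := hpre
  have hn : 1 ≤ (matrix.length : Int) := by
    have := List.length_pos_of_ne_nil hne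
    omega
  dsimp only
  -- row 0 and its length
  have hhead : PySem.List.pyGetD matrix 0 [] = matrix.headD [] := by
    cases matrix with
    | nil => exact absurd rfl hne
    | cons r t => simp [PySem.List.pyGetD_zero_cons]
  set c := (matrix.headD []).length with hc
  -- rewrite B's transpose into indexed columns
  rw [pv_zip_eq c matrix hne rfl hrows, pv_enum_map, pv_enum_range, List.map_map,
      List.foldl_map]
  rw [hhead]
  symm
  apply List.foldl_ext
  intro s j hj
  have hj' : 0 ≤ j ∧ j < (c : Int) := by
    have := (PySem.List.mem_pyRange_one).mp hj; exact ⟨this.1, this.2⟩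
  -- name the column values
  set v : Int → Int := fun i => PySem.List.pyGetD (PySem.List.pyGetD matrix i []) j 0 with hv
  have hcol : matrix.map (fun r => PySem.List.pyGetD r j 0)
      = (PySem.List.pyRange 0 (matrix.length : Int) 1).map v := by
    conv_lhs => rw [← PySem.List.map_pyGetD_pyRange_zero matrix ([] : List Int)]
    rw [List.map_map]
    simp [Function.comp]
    exact fun a _ _ => rfl
  dsimp only [Function.comp]
  rw [hcol]
  -- head of the column
  have hhd : PySem.List.pyGetD ((PySem.List.pyRange 0 (matrix.length : Int) 1).map v) 0 0 = v 0 := by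
    rw [PySem.List.pyRange_one_cons (by omega : (0:Int) < (matrix.length : Int))]
    simp [PySem.List.pyGetD_zero_cons]
  -- tail of the column
  have htl : PySem.List.slice ((PySem.List.pyRange 0 (matrix.length : Int) 1).map v) (some 1) none
      = (PySem.List.pyRange 1 (matrix.length : Int) 1).map v := by
    rw [PySem.List.slice_from_one,
        PySem.List.pyRange_one_cons (by omega : (0:Int) < (matrix.length : Int))]
    simp
  rw [hhd, htl, pv_enum_map, pv_enum_range, List.map_map, List.foldl_map]
  dsimp only [Function.comp_def]
  exact congrArg Prod.fst (pv_column v j (matrix.length : Int) hn s)
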